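-- pv_equiv track=rewrite | github.com/PCBZ/AlgorithmPractise | leetcode_tests/test_concatenated_words.py | _can_be_concatenated
-- ===== SOURCE A (Python) =====
-- def _can_be_concatenated(word: str, word_set: set) -> bool:
--     """Helper method to verify if a word can be concatenated."""
--     available_words = word_set - {word}  # Exclude the word itself
--
--     def can_form(remaining: str, used_count: int) -> bool:
--         if not remaining:
--             return used_count >= 2  # Must use at least 2 words
--
--         for i in range(1, len(remaining) + 1):
--             prefix = remaining[:i]
--             if prefix in available_words:
--                 if can_form(remaining[i:], used_count + 1):
--                     return True
--         return False
--
--     return can_form(word, 0)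
-- ===== SOURCE B (Python) =====
-- def _can_be_concatenated(word: str, word_set: set) -> bool:
--     """Word-break DP over suffix positions: dp[i] == word[i:] is a concatenation
--     of words from the dictionary (word itself excluded, so >=2 pieces)."""
--     n = len(word)
--     if n == 0:
--         return False
--     avail = word_set - {word}
--     dp = [False] * (n + 1)
--     dp[n] = True
--     for i in range(n - 1, -1, -1):
--         dp[i] = any(word[i:j] in avail and dp[j] for j in range(i + 1, n + 1))
--     return dp[0]
-- ===== Notes on version B (the rewrite author's own statement) =====
-- stated objective: faster
-- what changed: Replaced the exponential recursive prefix search (with a piece counter) by an iterative word-break DP over suffix start positions; the >=2-pieces condition is implied by excluding the word itself, so no counter is needed.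
import Mathlib
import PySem

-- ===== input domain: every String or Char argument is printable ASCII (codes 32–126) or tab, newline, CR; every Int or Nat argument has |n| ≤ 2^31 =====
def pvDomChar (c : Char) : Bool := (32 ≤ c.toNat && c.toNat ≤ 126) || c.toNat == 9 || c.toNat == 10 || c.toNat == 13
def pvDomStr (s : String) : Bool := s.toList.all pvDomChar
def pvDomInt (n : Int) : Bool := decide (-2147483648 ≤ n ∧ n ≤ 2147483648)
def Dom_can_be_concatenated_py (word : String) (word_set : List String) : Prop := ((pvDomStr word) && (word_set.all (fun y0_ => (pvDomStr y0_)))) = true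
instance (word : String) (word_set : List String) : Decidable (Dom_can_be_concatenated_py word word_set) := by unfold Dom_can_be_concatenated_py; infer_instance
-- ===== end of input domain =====

-- B replaces A's exponential recursive prefix search (with a piece counter) by an
-- iterative O(n^2) word-break DP over suffix positions; excluding the word itself
-- makes the ">=2 pieces" counter unnecessary.


-- ===== PORT A =====
-- inner 'def can_form(remaining, used_count)': for i in range(1, len(remaining)+1),
-- prefix = remaining[:i]; i is written k+1 with k ∈ range(len(remaining)) (same values, same order)
def canFormA (avail : List String) (remaining : List Char) (used_count : Int) : Bool :=
  if h : remaining = [] then decide (used_count ≥ 2)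
  else
    (List.range remaining.length).attach.any (fun ⟨k, hk⟩ =>
      let pre := remaining.take (k + 1)
      PySem.Set.contains avail (String.ofList pre) &&
        canFormA avail (remaining.drop (k + 1)) (used_count + 1))
termination_by remaining.length
decreasing_by
  have hl : 0 < remaining.length := List.length_pos_iff.mpr h
  simp only [List.mem_range] at hk
  simp [List.length_drop]; omega

def can_be_concatenated_py (word : String) (word_set : List String) : Bool :=
  let available_words := PySem.Set.diff word_set (PySem.Set.ofList [word])  -- word_set - {word}
  canFormA available_words word.toList 0

-- ===== PORT B =====
-- Source B: suffix word-break DP; dp[i] = word[i:] splittable into dictionary pieces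
def can_be_concatenated_py_alt (word : String) (word_set : List String) : Bool :=
  let cs := word.toList
  let n := cs.length
  if n = 0 then false
  else
    let avail := PySem.Set.diff word_set (PySem.Set.ofList [word])  -- word_set - {word}
    let dp0 := (List.replicate (n + 1) false).set n true
    -- for i in range(n-1, -1, -1): dp[i] = any(word[i:j] in avail and dp[j] for j in range(i+1, n+1))
    let dp := (List.range n).reverse.foldl
      (fun dp i => dp.set i ((List.range' (i + 1) (n - i)).any
        (fun j => PySem.Set.contains avail (String.ofList ((cs.drop i).take (j - i))) && dp.getD j false)))
      dp0
    dp.getD 0 false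

-- ===== PRECONDITION & SPEC =====
def Spec_can_be_concatenated_py (word : String) (word_set : List String) (out : Bool) : Prop := out = can_be_concatenated_py_alt word word_set
instance (word : String) (word_set : List String) (out : Bool) : Decidable (Spec_can_be_concatenated_py word word_set out) := by unfold Spec_can_be_concatenated_py; infer_instance

-- ===== CLAIM (what is proved, stated in full; the proofs are below) =====
def Claim_equal_can_be_concatenated_py : Prop := ∀ (word : String) (word_set : List String), Dom_can_be_concatenated_py word word_set → Spec_can_be_concatenated_py word word_set (can_be_concatenated_py word word_set)

-- ===== LEMMAS AND PROOFS =====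

-- the common spec: rem can be split into (≥ 0) nonempty pieces, each in avail
def seg (avail : List String) (rem : List Char) : Bool :=
  if h : rem = [] then true
  else
    (List.range rem.length).attach.any (fun ⟨k, hk⟩ =>
      PySem.Set.contains avail (String.ofList (rem.take (k + 1))) &&
        seg avail (rem.drop (k + 1)))
termination_by rem.length
decreasing_by
  have hl : 0 < rem.length := List.length_pos_iff.mpr h
  simp only [List.mem_range] at hk
  simp [List.length_drop]; omega

theorem seg_nil (avail : List String) : seg avail [] = true := by
  rw [seg]; simp

theorem seg_eq_any (avail : List String) (rem : List Char) (h : rem ≠ []) :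
    seg avail rem = (List.range rem.length).any (fun k =>
      PySem.Set.contains avail (String.ofList (rem.take (k + 1))) &&
        seg avail (rem.drop (k + 1))) := by
  rw [seg]
  simp only [h, dite_false, List.any_eq, List.mem_attach, List.mem_range, true_and,
    Subtype.exists, decide_eq_decide]
  exact exists_congr fun a => by tauto

theorem canFormA_of_ge_two (avail : List String) (rem : List Char) (u : Int) (hu : 2 ≤ u) :
    canFormA avail rem u = seg avail rem := by
  induction hn : rem.length using Nat.strong_induction_on generalizing rem u with
  | _ n ih =>
    rw [canFormA, seg]
    by_cases h : rem = []
    · simp [h]; omega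
    · simp only [h, dite_false]
      apply PySem.List.any_congr_mem
      rintro ⟨k, hk⟩ _
      simp only [List.mem_range] at hk
      congr 1
      exact ih (rem.drop (k + 1)).length (by subst hn; simp [List.length_drop]; omega)
        _ _ (by omega) rfl

theorem canFormA_one (avail : List String) (rem : List Char) (h : rem ≠ []) :
    canFormA avail rem 1 = seg avail rem := by
  rw [canFormA, seg]
  simp only [h, dite_false]
  apply PySem.List.any_congr_mem
  rintro ⟨k, hk⟩ _
  congr 1
  exact canFormA_of_ge_two avail _ _ (by omega)

theorem canFormA_zero (avail : List String) (rem : List Char) (h : rem ≠ [])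
    (hw : PySem.Set.contains avail (String.ofList rem) = false) :
    canFormA avail rem 0 = seg avail rem := by
  rw [canFormA, seg]
  simp only [h, dite_false]
  apply PySem.List.any_congr_mem
  rintro ⟨k, hk⟩ _
  simp only [List.mem_range] at hk
  by_cases hk' : k + 1 = rem.length
  · have ht : rem.take (k + 1) = rem := by rw [hk']; exact List.take_length
    rw [ht, hw]
    simp
  · have hne : rem.drop (k + 1) ≠ [] := by
      intro hc
      have := congrArg List.length hc
      simp [List.length_drop] at this
      omega
    congr 1
    exact canFormA_one avail _ hne

theorem getD_set_bool (l : List Bool) (i m : Nat) (v d : Bool) :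
    (l.set i v).getD m d = if m = i ∧ i < l.length then v else l.getD m d := by
  rcases eq_or_ne m i with rfl | hne
  · by_cases h : m < l.length
    · simp [List.getD, h]
    · simp [List.getD, h, List.set_eq_of_length_le (by omega : l.length ≤ m)]
  · simp [List.getD, List.getElem?_set_ne (by omega : i ≠ m), hne]

-- B's loop body, named for the proofs
def stepB (avail : List String) (cs : List Char) (dp : List Bool) (i : Nat) : List Bool :=
  dp.set i ((List.range' (i + 1) (cs.length - i)).any
    (fun j => PySem.Set.contains avail (String.ofList ((cs.drop i).take (j - i))) && dp.getD j false))

-- the loop invariant: after processing indices n-1 … i, every slot m ≥ i holds seg (cs.drop m)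
theorem dp_invariant (avail : List String) (cs : List Char) :
    ∀ (d i : Nat), i + d = cs.length →
    (((List.range' i d).reverse.foldl (stepB avail cs)
        ((List.replicate (cs.length + 1) false).set cs.length true)).length = cs.length + 1 ∧
     ∀ m, m ≤ cs.length →
      ((List.range' i d).reverse.foldl (stepB avail cs)
        ((List.replicate (cs.length + 1) false).set cs.length true)).getD m false =
        if m < i then false else seg avail (cs.drop m)) := by
  intro d
  induction d with
  | zero =>
    intro i hi
    simp only [List.range'_zero, List.reverse_nil, List.foldl_nil]
    constructor
    · simp
    · intro m hm
      by_cases h : m < cs.length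
      · rw [getD_set_bool, if_neg (by rintro ⟨h1, -⟩; omega), if_pos (by omega : m < i)]
        simp [List.getD, (by omega : m < cs.length + 1)]
      · have hmn : m = cs.length := by omega
        subst hmn
        rw [getD_set_bool, if_pos ⟨rfl, by simp⟩, if_neg (by omega : ¬ cs.length < i)]
        simp [seg_nil]
  | succ d' ih =>
    intro i hi
    obtain ⟨hlen, hval⟩ := ih (i + 1) (by omega)
    rw [List.range'_succ, List.reverse_cons, List.foldl_append, List.foldl_cons, List.foldl_nil]
    set dpPrev := (List.range' (i + 1) d').reverse.foldl (stepB avail cs)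
      ((List.replicate (cs.length + 1) false).set cs.length true) with hdp
    constructor
    · simp [stepB, hlen]
    · intro m hm
      rw [stepB, getD_set_bool]
      by_cases hmi : m = i
      · subst hmi
        have hmn : m < cs.length := by omega
        rw [if_pos ⟨rfl, by rw [hlen]; omega⟩, if_neg (by omega : ¬ m < m)]
        -- the newly computed value equals seg (cs.drop m)
        have hrem : cs.drop m ≠ [] := by
          intro hc
          have := congrArg List.length hc
          simp [List.length_drop] at this
          omega
        have hlr : (cs.drop m).length = cs.length - m := by simp [List.length_drop]
        rw [seg_eq_any avail _ hrem, hlr, List.range'_eq_map_range, List.any_map]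
        apply PySem.List.any_congr_mem
        intro k hk
        simp only [List.mem_range] at hk
        have h1 : (m + 1 + k) - m = k + 1 := by omega
        have h2 : (cs.drop m).drop (k + 1) = cs.drop (m + 1 + k) := by
          rw [List.drop_drop]; congr 1; omega
        rw [Function.comp_apply, h1, hval (m + 1 + k) (by omega),
          if_neg (by omega : ¬ m + 1 + k < m + 1), h2]
      · rw [if_neg (by rintro ⟨h1, -⟩; exact hmi h1), hval m hm]
        by_cases h1 : m < i
        · rw [if_pos h1, if_pos (by omega : m < i + 1)]
        · rw [if_neg h1, if_neg (by omega : ¬ m < i + 1)]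

theorem contains_diff_self (word_set : List String) (word : String) :
    PySem.Set.contains (PySem.Set.diff word_set (PySem.Set.ofList [word])) word = false := by
  simp [PySem.Set.diff, PySem.Set.contains, PySem.Set.ofList, PySem.Set.add, PySem.Set.empty]

-- ===== VERDICT (by name: the statement is the Claim_ definition above) =====
theorem can_be_concatenated_py_spec : Claim_equal_can_be_concatenated_py := by
  intro word word_set _
  unfold Spec_can_be_concatenated_py can_be_concatenated_py can_be_concatenated_py_alt
  simp only []
  by_cases h0 : word.toList = []
  · rw [canFormA]
    simp [h0]
  · have hn0 : word.toList.length ≠ 0 := fun hc => h0 (List.length_eq_zero_iff.mp hc)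
    rw [if_neg hn0]
    have hw : PySem.Set.contains (PySem.Set.diff word_set (PySem.Set.ofList [word]))
        (String.ofList word.toList) = false := by
      rw [String.ofList_toList]
      exact contains_diff_self word_set word
    rw [canFormA_zero _ _ h0 hw]
    have := dp_invariant (PySem.Set.diff word_set (PySem.Set.ofList [word])) word.toList
      word.toList.length 0 (by omega)
    obtain ⟨_, hval⟩ := this
    have heq : (List.range word.toList.length) = List.range' 0 word.toList.length := by
      simp [List.range_eq_range']
    rw [heq]
    have := hval 0 (by omega)
    rw [if_neg (by omega : ¬ (0:Nat) < 0)] at this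
    simpa [stepB] using this.symm
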